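-- pv_equiv track=rewrite | github.com/Adam-Said/Informatique-UMontpellier | L3/S5/HAI503 _ Algorithmique 4/TP3/Ex1.py | listesAdjacence
-- ===== SOURCE A (Python) =====
-- def listesAdjacence(n,A):
--   DicoAdja = {}
--   for i in range(n):
--     DicoAdja[i] = []
--     listTmp = []
--     for arete in A:
--       if (i in arete):
--         if(i == arete[0]):
--           listTmp.append(arete[1])
--         else:
--           listTmp.append(arete[0])
--         DicoAdja[i] = listTmp
--   return DicoAdja
-- ===== SOURCE B (Python) =====
-- def listesAdjacence(n, A):
--     D = {i: [] for i in range(n)}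
--     for u, v in A:
--         if 0 <= u < n:
--             D[u].append(v)
--         if v != u and 0 <= v < n:
--             D[v].append(u)
--     return D
-- ===== Notes on version B (the rewrite author's own statement) =====
-- stated objective: faster
-- what changed: Instead of scanning the whole edge list once per vertex (for each i in range(n), test i against every edge), B pre-creates the n empty lists and makes a single pass over the edges, appending each endpoint to the other's list (a self-loop contributes one entry, out-of-range endpoints are skipped).
import Mathlib
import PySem

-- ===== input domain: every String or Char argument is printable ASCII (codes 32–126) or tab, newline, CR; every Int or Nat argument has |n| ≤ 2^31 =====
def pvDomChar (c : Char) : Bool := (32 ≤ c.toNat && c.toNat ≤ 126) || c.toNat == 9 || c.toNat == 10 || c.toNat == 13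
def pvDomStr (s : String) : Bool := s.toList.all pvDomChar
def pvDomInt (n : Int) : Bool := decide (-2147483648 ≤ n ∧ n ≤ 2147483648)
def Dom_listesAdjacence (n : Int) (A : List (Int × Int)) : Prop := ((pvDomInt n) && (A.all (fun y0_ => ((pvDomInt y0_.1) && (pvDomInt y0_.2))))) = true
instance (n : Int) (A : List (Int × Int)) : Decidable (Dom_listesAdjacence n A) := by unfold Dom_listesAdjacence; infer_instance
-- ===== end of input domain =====

-- B replaces A's per-vertex scan of the whole edge list by one pre-built dict of empty
-- lists and a single pass over the edges (objective: faster, O(n+|A|) vs O(n*|A|)).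

-- ===== PORT A =====
def listesAdjacence (n : Int) (A : List (Int × Int)) : List (Int × List Int) :=
  ((PySem.List.pyRange 0 n 1).foldl (fun (D : PySem.Dict Int (List Int)) i =>
      -- DicoAdja[i] = []; listTmp = []; then the inner loop over A
      (A.foldl (fun (st : List Int × PySem.Dict Int (List Int)) arete =>
          if i = arete.1 ∨ i = arete.2 then
            let tmp := st.1 ++ [if i = arete.1 then arete.2 else arete.1]
            (tmp, st.2.insert i tmp)
          else st)
        (([] : List Int), D.insert i [])).2)
    PySem.Dict.empty).items

-- ===== PORT B =====
def listesAdjacence_alt (n : Int) (A : List (Int × Int)) : List (Int × List Int) :=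
  let D0 : PySem.Dict Int (List Int) :=
    (PySem.List.pyRange 0 n 1).foldl (fun d i => d.insert i []) PySem.Dict.empty
  (A.foldl (fun d (e : Int × Int) =>
      let d1 := if 0 ≤ e.1 ∧ e.1 < n then d.modify e.1 [] (fun xs => xs ++ [e.2]) else d
      if e.2 ≠ e.1 ∧ 0 ≤ e.2 ∧ e.2 < n then d1.modify e.2 [] (fun xs => xs ++ [e.1]) else d1)
    D0).items

-- ===== PRECONDITION & SPEC =====
def Spec_listesAdjacence (n : Int) (A : List (Int × Int)) (out : List (Int × List Int)) : Prop := out = listesAdjacence_alt n A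
instance (n : Int) (A : List (Int × Int)) (out : List (Int × List Int)) : Decidable (Spec_listesAdjacence n A out) := by unfold Spec_listesAdjacence; infer_instance

-- ===== CLAIM (what is proved, stated in full; the proofs are below) =====
def Claim_equal_listesAdjacence : Prop := ∀ (n : Int) (A : List (Int × Int)), Dom_listesAdjacence n A → Spec_listesAdjacence n A (listesAdjacence n A)

-- ===== LEMMAS AND PROOFS =====

-- contribution of a single edge to vertex i's list (common characterisation)
def nbrs1 (i : Int) (e : Int × Int) : List Int :=
  if i = e.1 then [e.2] else if i = e.2 then [e.1] else []

def nbrs (i : Int) (es : List (Int × Int)) : List Int := es.flatMap (nbrs1 i)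

theorem nbrs_nil (i : Int) : nbrs i [] = [] := rfl

theorem nbrs_cons (i : Int) (e : Int × Int) (es : List (Int × Int)) :
    nbrs i (e :: es) = nbrs1 i e ++ nbrs i es := rfl

-- A's inner loop: grows listTmp by the neighbours and keeps DicoAdja[i] = listTmp
theorem innerA (i : Int) (es : List (Int × Int)) (tmp : List Int)
    (D : PySem.Dict Int (List Int)) :
    es.foldl (fun (st : List Int × PySem.Dict Int (List Int)) arete =>
        if i = arete.1 ∨ i = arete.2 then
          let tmp := st.1 ++ [if i = arete.1 then arete.2 else arete.1]
          (tmp, st.2.insert i tmp)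
        else st)
      (tmp, D.insert i tmp)
    = (tmp ++ nbrs i es, D.insert i (tmp ++ nbrs i es)) := by
  induction es generalizing tmp D with
  | nil => simp [nbrs_nil]
  | cons e es ih =>
    simp only [List.foldl_cons]
    by_cases h : i = e.1 ∨ i = e.2
    · simp only [h, if_pos]
      rw [PySem.Dict.insert_insert_self]
      rw [ih (tmp ++ [if i = e.1 then e.2 else e.1]) D]
      have hx : nbrs1 i e = [if i = e.1 then e.2 else e.1] := by
        by_cases h1 : i = e.1
        · simp [nbrs1, h1]
        · have h2 : i = e.2 := h.resolve_left h1
          simp only [nbrs1, if_neg h1, if_pos h2]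
      rw [nbrs_cons, hx, List.append_assoc]
    · simp only [h, if_neg, not_false_iff]
      rw [ih tmp D]
      have hx : nbrs1 i e = [] := by
        rw [not_or] at h
        simp [nbrs1, h.1, h.2]
      rw [nbrs_cons, hx, List.nil_append]

-- the dict of shape (i, g i) over distinct keys, after one modify at a present key
theorem modify_map_shape (l : List Int) (hl : l.Nodup) (g : Int → List Int) (k : Int)
    (hk : k ∈ l) (f : List Int → List Int) :
    (PySem.Dict.mk (l.map (fun i => (i, g i)))).modify k [] f
      = PySem.Dict.mk (l.map (fun i => (i, if i = k then f (g k) else g i))) := by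
  have hkeys : (PySem.Dict.mk (l.map (fun i => (i, g i)))).keys = l := by
    simp [PySem.Dict.keys, Function.comp_def]
  have hnd : (PySem.Dict.mk (l.map (fun i => (i, g i)))).keys.Nodup := by
    rw [hkeys]; exact hl
  have hmem : (k, g k) ∈ (PySem.Dict.mk (l.map (fun i => (i, g i)))).items :=
    List.mem_map.mpr ⟨k, hk, rfl⟩
  have hget : (PySem.Dict.mk (l.map (fun i => (i, g i)))).getD k [] = g k :=
    PySem.Dict.getD_of_mem_items _ hmem hnd []
  have hcont : (PySem.Dict.mk (l.map (fun i => (i, g i)))).contains k = true := by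
    rw [PySem.Dict.contains_iff_mem_keys, hkeys]; exact hk
  show (PySem.Dict.mk (l.map (fun i => (i, g i)))).insert k
      (f ((PySem.Dict.mk (l.map (fun i => (i, g i)))).getD k [])) = _
  rw [hget]
  apply PySem.Dict.ext
  rw [PySem.Dict.items_insert_of_contains _ _ hcont]
  show (l.map (fun i => (i, g i))).map _ = _
  rw [List.map_map]
  apply List.map_congr_left
  intro i _
  by_cases hik : i = k <;> simp [hik]

-- B's per-edge step (zeta-reduced form) preserves the shape and appends nbrs1
set_option maxHeartbeats 800000 in
theorem stepB_shape (n : Int) (e : Int × Int) (g : Int → List Int) :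
    (if e.2 ≠ e.1 ∧ 0 ≤ e.2 ∧ e.2 < n then
       (if 0 ≤ e.1 ∧ e.1 < n then
          (PySem.Dict.mk ((PySem.List.pyRange 0 n 1).map (fun i => (i, g i)))).modify e.1 []
            (fun xs => xs ++ [e.2])
        else PySem.Dict.mk ((PySem.List.pyRange 0 n 1).map (fun i => (i, g i)))).modify e.2 []
         (fun xs => xs ++ [e.1])
     else
       if 0 ≤ e.1 ∧ e.1 < n then
         (PySem.Dict.mk ((PySem.List.pyRange 0 n 1).map (fun i => (i, g i)))).modify e.1 []
           (fun xs => xs ++ [e.2])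
       else PySem.Dict.mk ((PySem.List.pyRange 0 n 1).map (fun i => (i, g i))))
    = PySem.Dict.mk ((PySem.List.pyRange 0 n 1).map (fun i => (i, g i ++ nbrs1 i e))) := by
  have hl : (PySem.List.pyRange 0 n 1).Nodup := PySem.List.nodup_pyRange_one 0 n
  have key : ∀ (h : Int → List Int),
      (∀ i ∈ PySem.List.pyRange 0 n 1, h i = g i ++ nbrs1 i e) →
      ((PySem.List.pyRange 0 n 1).map (fun i => (i, h i)))
        = (PySem.List.pyRange 0 n 1).map (fun i => (i, g i ++ nbrs1 i e)) := by
    intro h hh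
    apply List.map_congr_left
    intro i hi
    rw [hh i hi]
  have hnem1 : ∀ i ∈ PySem.List.pyRange 0 n 1, ¬ (0 ≤ e.1 ∧ e.1 < n) → i ≠ e.1 := by
    intro i hi h1 hie
    rcases PySem.List.mem_pyRange_one.mp hi with ⟨hia, hib⟩
    exact h1 ⟨hie ▸ hia, hie ▸ hib⟩
  by_cases h2 : e.2 ≠ e.1 ∧ 0 ≤ e.2 ∧ e.2 < n
  · have hm2 : e.2 ∈ PySem.List.pyRange 0 n 1 := PySem.List.mem_pyRange_one.mpr h2.2
    rw [if_pos h2]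
    by_cases h1 : 0 ≤ e.1 ∧ e.1 < n
    · have hm1 : e.1 ∈ PySem.List.pyRange 0 n 1 := PySem.List.mem_pyRange_one.mpr h1
      rw [if_pos h1, modify_map_shape _ hl g e.1 hm1,
          modify_map_shape _ hl (fun i => if i = e.1 then (fun xs => xs ++ [e.2]) (g e.1) else g i) e.2 hm2]
      congr 1
      apply key
      intro i hi
      by_cases hi2 : i = e.2
      · subst hi2
        simp [nbrs1, h2.1]
      · by_cases hi1 : i = e.1
        · have he12 : ¬ e.1 = e.2 := fun h => hi2 (hi1.trans h)
          simp [nbrs1, hi1, he12]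
        · simp [nbrs1, hi1, hi2]
    · rw [if_neg h1, modify_map_shape _ hl g e.2 hm2]
      congr 1
      apply key
      intro i hi
      have hi1 : i ≠ e.1 := hnem1 i hi h1
      by_cases hi2 : i = e.2
      · simp [nbrs1, hi2, h2.1]
      · simp [nbrs1, hi1, hi2]
  · rw [if_neg h2]
    by_cases h1 : 0 ≤ e.1 ∧ e.1 < n
    · have hm1 : e.1 ∈ PySem.List.pyRange 0 n 1 := PySem.List.mem_pyRange_one.mpr h1
      rw [if_pos h1, modify_map_shape _ hl g e.1 hm1]
      congr 1
      apply key
      intro i hi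
      by_cases hi1 : i = e.1
      · simp [nbrs1, hi1]
      · have hi2 : i ≠ e.2 := by
          intro hie
          rcases PySem.List.mem_pyRange_one.mp hi with ⟨hia, hib⟩
          exact h2 ⟨fun hee => hi1 (hie.trans hee), hie ▸ hia, hie ▸ hib⟩
        simp [nbrs1, hi1, hi2]
    · rw [if_neg h1]
      congr 1
      apply key
      intro i hi
      have hi1 : i ≠ e.1 := hnem1 i hi h1
      have hi2 : i ≠ e.2 := by
        intro hie
        rcases PySem.List.mem_pyRange_one.mp hi with ⟨hia, hib⟩
        by_cases hee : e.2 = e.1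
        · exact h1 ⟨(hie.trans hee) ▸ hia, (hie.trans hee) ▸ hib⟩
        · exact h2 ⟨hee, hie ▸ hia, hie ▸ hib⟩
      simp [nbrs1, hi1, hi2]

-- B's edge loop over a dict of shape (i, g i) (zeta-reduced form of the step)
set_option maxHeartbeats 800000 in
theorem foldB (n : Int) (es : List (Int × Int)) (g : Int → List Int) :
    (es.foldl (fun d (e : Int × Int) =>
        if e.2 ≠ e.1 ∧ 0 ≤ e.2 ∧ e.2 < n then
          (if 0 ≤ e.1 ∧ e.1 < n then d.modify e.1 [] (fun xs => xs ++ [e.2]) else d).modify e.2 []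
            (fun xs => xs ++ [e.1])
        else if 0 ≤ e.1 ∧ e.1 < n then d.modify e.1 [] (fun xs => xs ++ [e.2]) else d)
      (PySem.Dict.mk ((PySem.List.pyRange 0 n 1).map (fun i => (i, g i))))).items
    = (PySem.List.pyRange 0 n 1).map (fun i => (i, g i ++ nbrs i es)) := by
  induction es generalizing g with
  | nil =>
    simp only [List.foldl_nil]
    apply List.map_congr_left
    intro i _
    rw [nbrs_nil, List.append_nil]
  | cons e es ih =>
    simp only [List.foldl_cons]
    rw [stepB_shape n e g]
    rw [ih (fun i => g i ++ nbrs1 i e)]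
    apply List.map_congr_left
    intro i _
    rw [nbrs_cons, List.append_assoc]

-- both programs produce the items list (i, nbrs i A) for i = 0..n-1
set_option maxHeartbeats 800000 in
theorem listesAdjacence_eq (n : Int) (A : List (Int × Int)) :
    listesAdjacence n A = (PySem.List.pyRange 0 n 1).map (fun i => (i, nbrs i A)) := by
  unfold listesAdjacence
  have hstep : ∀ (D : PySem.Dict Int (List Int)) (i : Int),
      (A.foldl (fun (st : List Int × PySem.Dict Int (List Int)) arete =>
          if i = arete.1 ∨ i = arete.2 then
            let tmp := st.1 ++ [if i = arete.1 then arete.2 else arete.1]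
            (tmp, st.2.insert i tmp)
          else st)
        (([] : List Int), D.insert i [])).2 = D.insert i (nbrs i A) := by
    intro D i
    rw [innerA i A [] D]
    simp
  simp only [hstep]
  have hfresh : ∀ a ∈ PySem.List.pyRange 0 n 1,
      (PySem.Dict.empty : PySem.Dict Int (List Int)).contains ((fun i => i) a) = false :=
    fun a _ => PySem.Dict.contains_empty a
  have hkn : ((PySem.List.pyRange 0 n 1).map (fun i => i)).Nodup := by
    simpa using PySem.List.nodup_pyRange_one 0 n
  have h := PySem.Dict.items_foldl_insert_fresh (PySem.List.pyRange 0 n 1) (fun i => i)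
      (fun i => nbrs i A) PySem.Dict.empty hfresh hkn
  simpa [PySem.Dict.empty] using h

set_option maxHeartbeats 800000 in
theorem listesAdjacence_alt_eq (n : Int) (A : List (Int × Int)) :
    listesAdjacence_alt n A = (PySem.List.pyRange 0 n 1).map (fun i => (i, nbrs i A)) := by
  unfold listesAdjacence_alt
  have hfresh : ∀ a ∈ PySem.List.pyRange 0 n 1,
      (PySem.Dict.empty : PySem.Dict Int (List Int)).contains ((fun i => i) a) = false :=
    fun a _ => PySem.Dict.contains_empty a
  have hkn : ((PySem.List.pyRange 0 n 1).map (fun i => i)).Nodup := by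
    simpa using PySem.List.nodup_pyRange_one 0 n
  have hD0 : (PySem.List.pyRange 0 n 1).foldl
      (fun (d : PySem.Dict Int (List Int)) i => d.insert i []) PySem.Dict.empty
      = PySem.Dict.mk ((PySem.List.pyRange 0 n 1).map (fun i => (i, ([] : List Int)))) := by
    apply PySem.Dict.ext
    have h := PySem.Dict.items_foldl_insert_fresh (PySem.List.pyRange 0 n 1) (fun i => i)
        (fun _ => ([] : List Int)) PySem.Dict.empty hfresh hkn
    simpa [PySem.Dict.empty] using h
  rw [hD0]
  refine Eq.trans (foldB n A (fun _ => ([] : List Int))) ?_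
  simp

-- ===== VERDICT (by name: the statement is the Claim_ definition above) =====
theorem listesAdjacence_spec : Claim_equal_listesAdjacence := by
  intro n A _
  unfold Spec_listesAdjacence
  rw [listesAdjacence_eq, listesAdjacence_alt_eq]
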